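-- pv_equiv track=rewrite | github.com/AtlasOrionL/orion-vision-core | experimental/gaming_ai/conflict_resolution.py | _check_strategy_conflict
-- ===== SOURCE A (Python) =====
-- from typing import Dict, List, Any, Optional, Tuple, Callable
--
-- def _check_strategy_conflict(decisions: List[Dict[str, Any]]) -> bool:
--     """Check for strategy conflicts"""
--     strategies = set()
--
--     for decision in decisions:
--         strategy = decision.get("strategy_type")
--         if strategy:
--             strategies.add(strategy)
--
--     # Conflicting strategies
--     conflicting_pairs = [
--         ("offensive", "defensive"),
--         ("advance", "retreat"),
--         ("aggressive", "conservative")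
--     ]
--
--     for strategy1, strategy2 in conflicting_pairs:
--         if strategy1 in strategies and strategy2 in strategies:
--             return True
--
--     return False
-- ===== SOURCE B (Python) =====
-- # B: single early-exit pass with a conflict-partner lookup table and a running
-- # `seen` set, instead of A's collect-all-strategies-then-scan-fixed-pairs phases.
--
-- _CONFLICT = {
--     "offensive": "defensive",
--     "defensive": "offensive",
--     "advance": "retreat",
--     "retreat": "advance",
--     "aggressive": "conservative",
--     "conservative": "aggressive",
-- }
--
--
-- def _check_strategy_conflict(decisions):
--     """Check for strategy conflicts"""
--     seen = set()
--     for decision in decisions: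
--         strategy = decision.get("strategy_type")
--         if strategy:
--             if _CONFLICT.get(strategy) in seen:
--                 return True
--             seen.add(strategy)
--     return False
-- ===== Notes on version B (the rewrite author's own statement) =====
-- stated objective: alternative
-- what changed: Replaced A's two-phase structure (collect every truthy strategy into a set, then scan three hard-coded conflicting pairs) with a single early-exit pass that keeps a seen-set and, via a precomputed strategy->opposite partner table, reports a conflict the moment a strategy whose partner was already seen appears.
import Mathlib
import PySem

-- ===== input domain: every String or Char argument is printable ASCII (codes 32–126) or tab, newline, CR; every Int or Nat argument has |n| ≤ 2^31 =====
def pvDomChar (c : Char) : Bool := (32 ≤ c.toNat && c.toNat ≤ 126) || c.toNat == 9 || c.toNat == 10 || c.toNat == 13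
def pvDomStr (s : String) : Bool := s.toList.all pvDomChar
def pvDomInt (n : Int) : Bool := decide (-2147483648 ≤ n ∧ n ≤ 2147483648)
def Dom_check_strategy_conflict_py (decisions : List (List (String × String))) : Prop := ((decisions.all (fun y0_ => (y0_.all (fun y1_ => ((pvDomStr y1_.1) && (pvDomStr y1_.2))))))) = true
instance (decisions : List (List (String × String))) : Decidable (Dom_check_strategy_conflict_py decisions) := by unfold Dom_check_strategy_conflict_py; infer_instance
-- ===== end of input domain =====

-- B replaces A's collect-then-scan-fixed-pairs phases with one early-exit pass
-- over a seen-set driven by a conflict-partner lookup table (objective: alternative).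

-- ===== PORT A =====
def check_strategy_conflict_py (decisions : List (List (String × String))) : Bool :=
  -- strategies = set(); for decision in decisions: s = decision.get("strategy_type"); if s: strategies.add(s)
  let strategies : PySem.Set String :=
    decisions.foldl (fun acc d =>
      match (PySem.Dict.mk d).get? "strategy_type" with
      | some s => if s ≠ "" then acc.add s else acc
      | none => acc) PySem.Set.empty
  let conflicting_pairs : List (String × String) :=
    [("offensive", "defensive"), ("advance", "retreat"), ("aggressive", "conservative")]
  -- for s1, s2 in conflicting_pairs: if s1 in strategies and s2 in strategies: return True -- (early return = any)
  conflicting_pairs.any (fun p => strategies.contains p.1 && strategies.contains p.2)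

-- ===== PORT B =====
-- the module-level _CONFLICT dict of Source B
def pvConflict : PySem.Dict String String :=
  PySem.Dict.mk [("offensive", "defensive"), ("defensive", "offensive"),
                 ("advance", "retreat"), ("retreat", "advance"),
                 ("aggressive", "conservative"), ("conservative", "aggressive")]

-- the for-loop of Source B: early return True, else carry `seen` on
def pvScan (seen : PySem.Set String) : List (List (String × String)) → Bool
  | [] => false
  | d :: rest =>
    match (PySem.Dict.mk d).get? "strategy_type" with
    | some s =>
      if s ≠ "" then
        -- `_CONFLICT.get(strategy) in seen` (None is never in a set of strings)
        match pvConflict.get? s with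
        | some p => if seen.contains p then true else pvScan (seen.add s) rest
        | none => pvScan (seen.add s) rest
      else pvScan seen rest
    | none => pvScan seen rest

def check_strategy_conflict_py_alt (decisions : List (List (String × String))) : Bool :=
  pvScan PySem.Set.empty decisions

-- ===== PRECONDITION & SPEC =====
def Spec_check_strategy_conflict_py (decisions : List (List (String × String))) (out : Bool) : Prop := out = check_strategy_conflict_py_alt decisions
instance (decisions : List (List (String × String))) (out : Bool) : Decidable (Spec_check_strategy_conflict_py decisions out) := by unfold Spec_check_strategy_conflict_py; infer_instance

-- ===== CLAIM (what is proved, stated in full; the proofs are below) =====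
def Claim_equal_check_strategy_conflict_py : Prop := ∀ (decisions : List (List (String × String))), Dom_check_strategy_conflict_py decisions → Spec_check_strategy_conflict_py decisions (check_strategy_conflict_py decisions)

-- ===== LEMMAS AND PROOFS =====

-- the (truthy) strategy values of the decisions, in order
def pvStrats : List (List (String × String)) → List String
  | [] => []
  | d :: rest =>
    match (PySem.Dict.mk d).get? "strategy_type" with
    | some s => if s ≠ "" then s :: pvStrats rest else pvStrats rest
    | none => pvStrats rest

-- the partner table is symmetric and irreflexive
lemma pvConflict_cases (s p : String) (h : pvConflict.get? s = some p) :
    (s = "offensive" ∧ p = "defensive") ∨ (s = "defensive" ∧ p = "offensive") ∨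
    (s = "advance" ∧ p = "retreat") ∨ (s = "retreat" ∧ p = "advance") ∨
    (s = "aggressive" ∧ p = "conservative") ∨ (s = "conservative" ∧ p = "aggressive") := by
  simp only [pvConflict, PySem.Dict.get?_mk_cons, beq_iff_eq] at h
  split_ifs at h <;> simp_all [PySem.Dict.get?]

lemma pvConflict_symm (s p : String) (h : pvConflict.get? s = some p) :
    pvConflict.get? p = some s := by
  rcases pvConflict_cases s p h with ⟨hs, hp⟩ | ⟨hs, hp⟩ | ⟨hs, hp⟩ | ⟨hs, hp⟩ | ⟨hs, hp⟩ | ⟨hs, hp⟩ <;>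
    subst hs <;> subst hp <;> decide

lemma pvConflict_ne (s p : String) (h : pvConflict.get? s = some p) : p ≠ s := by
  rcases pvConflict_cases s p h with ⟨hs, hp⟩ | ⟨hs, hp⟩ | ⟨hs, hp⟩ | ⟨hs, hp⟩ | ⟨hs, hp⟩ | ⟨hs, hp⟩ <;>
    subst hs <;> subst hp <;> decide

-- A's collecting fold is Set.update with the truthy strategies
lemma A_fold_eq (l : List (List (String × String))) (seen : PySem.Set String) :
    l.foldl (fun acc d =>
      match (PySem.Dict.mk d).get? "strategy_type" with
      | some s => if s ≠ "" then acc.add s else acc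
      | none => acc) seen = PySem.Set.update seen (pvStrats l) := by
  induction l generalizing seen with
  | nil => rfl
  | cons d rest ih =>
    simp only [List.foldl_cons, pvStrats]
    cases (PySem.Dict.mk d).get? "strategy_type" with
    | none => exact ih seen
    | some s =>
      by_cases hs : s ≠ ""
      · simp only [if_pos hs, PySem.Set.update, List.foldl_cons]
        exact ih (seen.add s)
      · simp only [if_neg hs]
        exact ih seen

-- characterisation of A
lemma A_iff (decisions : List (List (String × String))) :
    check_strategy_conflict_py decisions = true ↔
      (("offensive" ∈ pvStrats decisions ∧ "defensive" ∈ pvStrats decisions) ∨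
       ("advance" ∈ pvStrats decisions ∧ "retreat" ∈ pvStrats decisions) ∨
       ("aggressive" ∈ pvStrats decisions ∧ "conservative" ∈ pvStrats decisions)) := by
  unfold check_strategy_conflict_py
  rw [A_fold_eq]
  simp [PySem.Set.mem_update, PySem.Set.empty, and_comm]

-- one step of B's seen-set: pushing a new strategy into `seen` matches prefixing it to the remaining strategies
lemma pvScan_step (rest : List (List (String × String))) (seen : PySem.Set String) (s0 : String)
    (ih : pvScan (seen.add s0) rest = true ↔
      ∃ s p, s ∈ pvStrats rest ∧ pvConflict.get? s = some p ∧ (p ∈ seen.add s0 ∨ p ∈ pvStrats rest))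
    (hmiss : ∀ p0, pvConflict.get? s0 = some p0 → p0 ∉ seen) :
    pvScan (seen.add s0) rest = true ↔
      ∃ s p, s ∈ s0 :: pvStrats rest ∧ pvConflict.get? s = some p ∧
        (p ∈ seen ∨ p ∈ s0 :: pvStrats rest) := by
  rw [ih]
  constructor
  · rintro ⟨s, p, hsm, hpp, hmem⟩
    refine ⟨s, p, List.mem_cons_of_mem _ hsm, hpp, ?_⟩
    rcases hmem with hmem | hmem
    · rcases (PySem.Set.mem_add seen s0 p).1 hmem with h | h
      · exact Or.inl h
      · exact Or.inr (h ▸ List.mem_cons_self ..)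
    · exact Or.inr (List.mem_cons_of_mem _ hmem)
  · rintro ⟨s, p, hsm, hpp, hmem⟩
    rcases List.mem_cons.1 hsm with hes | hsm
    · -- the found strategy is s0 itself
      rcases hmem with hmem | hmem
      · exact absurd hmem (hmiss p (hes ▸ hpp))
      · rcases List.mem_cons.1 hmem with hep | hmem
        · exact absurd (hep.trans hes.symm) (pvConflict_ne s p hpp)
        · exact ⟨p, s, hmem, pvConflict_symm s p hpp,
            Or.inl ((PySem.Set.mem_add seen s0 s).2 (Or.inr hes))⟩
    · rcases hmem with hmem | hmem
      · exact ⟨s, p, hsm, hpp, Or.inl ((PySem.Set.mem_add seen s0 p).2 (Or.inl hmem))⟩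
      · rcases List.mem_cons.1 hmem with hep | hmem
        · exact ⟨s, p, hsm, hpp, Or.inl ((PySem.Set.mem_add seen s0 p).2 (Or.inr hep))⟩
        · exact ⟨s, p, hsm, hpp, Or.inr hmem⟩

-- characterisation of B's loop
lemma pvScan_iff (l : List (List (String × String))) (seen : PySem.Set String) :
    pvScan seen l = true ↔
      ∃ s p, s ∈ pvStrats l ∧ pvConflict.get? s = some p ∧ (p ∈ seen ∨ p ∈ pvStrats l) := by
  induction l generalizing seen with
  | nil => simp [pvScan, pvStrats]
  | cons d rest ih =>
    simp only [pvScan, pvStrats]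
    cases hd : (PySem.Dict.mk d).get? "strategy_type" with
    | none => exact ih seen
    | some s0 =>
      by_cases hs0 : s0 ≠ ""
      · simp only [if_pos hs0]
        cases hp0 : pvConflict.get? s0 with
        | some p0 =>
          by_cases hseen : seen.contains p0 = true
          · simp only [if_pos hseen]
            refine iff_of_true trivial ⟨s0, p0, ?_, hp0,
              Or.inl ((PySem.Set.contains_iff seen p0).1 hseen)⟩
            exact List.mem_cons_self
          · simp only [if_neg hseen]
            exact pvScan_step rest seen s0 (ih (seen.add s0))
              (fun p h => by
                rw [hp0] at h; injection h with h
                exact fun hm => hseen ((PySem.Set.contains_iff seen p0).2 (by rw [h]; exact hm)))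
        | none =>
          exact pvScan_step rest seen s0 (ih (seen.add s0))
            (fun p h => by rw [hp0] at h; exact absurd h (by simp))
      · simp only [if_neg hs0]
        exact ih seen

lemma B_iff (decisions : List (List (String × String))) :
    check_strategy_conflict_py_alt decisions = true ↔
      ∃ s p, s ∈ pvStrats decisions ∧ pvConflict.get? s = some p ∧ p ∈ pvStrats decisions := by
  unfold check_strategy_conflict_py_alt
  rw [pvScan_iff]
  simp [PySem.Set.empty]

-- ===== VERDICT (by name: the statement is the Claim_ definition above) =====
theorem check_strategy_conflict_py_spec : Claim_equal_check_strategy_conflict_py := by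
  intro decisions _
  unfold Spec_check_strategy_conflict_py
  rw [Bool.eq_iff_iff, A_iff, B_iff]
  constructor
  · rintro (⟨h1, h2⟩ | ⟨h1, h2⟩ | ⟨h1, h2⟩)
    · exact ⟨"offensive", "defensive", h1, by decide, h2⟩
    · exact ⟨"advance", "retreat", h1, by decide, h2⟩
    · exact ⟨"aggressive", "conservative", h1, by decide, h2⟩
  · rintro ⟨s, p, hs, hpp, hp⟩
    rcases pvConflict_cases s p hpp with ⟨rfl, rfl⟩ | ⟨rfl, rfl⟩ | ⟨rfl, rfl⟩ | ⟨rfl, rfl⟩ | ⟨rfl, rfl⟩ | ⟨rfl, rfl⟩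
    · exact Or.inl ⟨hs, hp⟩
    · exact Or.inl ⟨hp, hs⟩
    · exact Or.inr (Or.inl ⟨hs, hp⟩)
    · exact Or.inr (Or.inl ⟨hp, hs⟩)
    · exact Or.inr (Or.inr ⟨hs, hp⟩)
    · exact Or.inr (Or.inr ⟨hp, hs⟩)
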